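-- pv_equiv track=rewrite | github.com/SatwickDev/EEAdmin | EEAIAdmin/final_fix_headers.py | get_active_nav
-- ===== SOURCE A (Python) =====
-- def get_active_nav(filename):
--     """Determine which nav item should be active based on filename"""
--     active_map = {
--         'analytics': ['analytics_improved.html', 'analytics_new.html'],
--         'ai_chat': ['ai_chat.html', 'ai_chat_pro.html', 'ai_chat_modern.html', 'ai_chat - Copy.html',
--                    'chat.html', 'clean_chat.html', 'enhanced_chat.html', 'enhanced_chat_complete.html',
--                    'smart_chat.html'],
--         'compliance': ['compliance_checker.html', 'compliance_results.html', 'doccheck.html'],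
--         'documents': ['document_classification.html', 'document_classification_ai.html',
--                      'document_classification_modern.html', 'document_upload.html',
--                      'document_classification - Copy.html', 'document_classification_backup.html'],
--         'dashboard': ['index.html', 'richold.html', 'chromadb_status.html', 'rich.html', 'websiteIndex.html']
--     }
--
--     for nav, files in active_map.items():
--         if filename in files:
--             return nav
--     return 'dashboard'
-- ===== SOURCE B (Python) =====
-- _ACTIVE_MAP = {
--     'analytics': ['analytics_improved.html', 'analytics_new.html'],
--     'ai_chat': ['ai_chat.html', 'ai_chat_pro.html', 'ai_chat_modern.html', 'ai_chat - Copy.html',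
--                 'chat.html', 'clean_chat.html', 'enhanced_chat.html', 'enhanced_chat_complete.html',
--                 'smart_chat.html'],
--     'compliance': ['compliance_checker.html', 'compliance_results.html', 'doccheck.html'],
--     'documents': ['document_classification.html', 'document_classification_ai.html',
--                   'document_classification_modern.html', 'document_upload.html',
--                   'document_classification - Copy.html', 'document_classification_backup.html'],
--     'dashboard': ['index.html', 'richold.html', 'chromadb_status.html', 'rich.html', 'websiteIndex.html']
-- }
--
-- # Flat (filename, nav) pairs, sorted by filename, searched by binary search.
-- _PAIRS = sorted((f, nav) for nav, files in _ACTIVE_MAP.items() for f in files)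
--
--
-- def get_active_nav(filename):
--     """Determine which nav item should be active based on filename"""
--     lo, hi = 0, len(_PAIRS)
--     while lo < hi:
--         mid = (lo + hi) // 2
--         key, nav = _PAIRS[mid]
--         if key == filename:
--             return nav
--         if key < filename:
--             lo = mid + 1
--         else:
--             hi = mid
--     return 'dashboard'
-- ===== Notes on version B (the rewrite author's own statement) =====
-- stated objective: alternative
-- what changed: Replaced A's linear scan over the category dict (membership test in each file list) by a flat (filename, nav) table sorted once, searched per call with a hand-written binary search.
import Mathlib
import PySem

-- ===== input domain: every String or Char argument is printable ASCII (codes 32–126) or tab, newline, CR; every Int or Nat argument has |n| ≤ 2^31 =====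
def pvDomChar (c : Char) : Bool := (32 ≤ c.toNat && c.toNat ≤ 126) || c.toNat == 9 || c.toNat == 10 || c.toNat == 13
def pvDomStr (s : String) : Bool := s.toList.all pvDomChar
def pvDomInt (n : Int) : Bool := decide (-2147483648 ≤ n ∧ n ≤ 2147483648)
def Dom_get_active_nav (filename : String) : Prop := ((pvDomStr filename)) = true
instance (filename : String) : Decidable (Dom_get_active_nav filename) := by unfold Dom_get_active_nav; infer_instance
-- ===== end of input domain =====

-- B replaces A's linear scan over the category map by a flat (filename, nav) table sorted
-- once and searched with a hand-written binary search (alternative algorithm; same results).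

-- the literal active_map (shared data, in Python source order)
def activeItems : List (String × List String) :=
  [("analytics", ["analytics_improved.html", "analytics_new.html"]),
   ("ai_chat", ["ai_chat.html", "ai_chat_pro.html", "ai_chat_modern.html", "ai_chat - Copy.html",
                "chat.html", "clean_chat.html", "enhanced_chat.html", "enhanced_chat_complete.html",
                "smart_chat.html"]),
   ("compliance", ["compliance_checker.html", "compliance_results.html", "doccheck.html"]),
   ("documents", ["document_classification.html", "document_classification_ai.html",
                  "document_classification_modern.html", "document_upload.html",
                  "document_classification - Copy.html", "document_classification_backup.html"]),
   ("dashboard", ["index.html", "richold.html", "chromadb_status.html", "rich.html", "websiteIndex.html"])]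

-- ===== PORT A =====
-- 'for nav, files in active_map.items(): if filename in files: return nav' / 'return "dashboard"'
def navScan (filename : String) : List (String × List String) → String
  | [] => "dashboard"
  | (nav, files) :: rest => if files.contains filename then nav else navScan filename rest

def get_active_nav (filename : String) : String :=
  navScan filename activeItems

-- ===== PORT B =====
-- '_PAIRS = sorted((f, nav) for nav, files in _ACTIVE_MAP.items() for f in files)'
-- Python sorts the tuples lexicographically; the filenames (first components) are all
-- distinct, so sorting by the first component is exactly the same order.
def pairsB : List (String × String) :=
  PySem.List.sorted (activeItems.flatMap (fun p => p.2.map (fun f => (f, p.1)))) (fun q => q.1) false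

-- the 'while lo < hi' binary-search loop of B; '_PAIRS[mid]' is always in range in
-- Python (0 ≤ lo ≤ mid < hi ≤ len), so a default-read getD is exact here
def pvBsearch (pairs : List (String × String)) (x : String) (lo hi : Nat) : String :=
  if _h : lo < hi then
    let mid := (lo + hi) / 2
    let p := pairs.getD mid ("", "")
    if p.1 = x then p.2
    else if p.1 < x then pvBsearch pairs x (mid + 1) hi
    else pvBsearch pairs x lo mid
  else "dashboard"
termination_by hi - lo
decreasing_by all_goals omega

def get_active_nav_alt (filename : String) : String :=
  pvBsearch pairsB filename 0 pairsB.length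

-- ===== PRECONDITION & SPEC =====
def Spec_get_active_nav (filename : String) (out : String) : Prop := out = get_active_nav_alt filename
instance (filename : String) (out : String) : Decidable (Spec_get_active_nav filename out) := by unfold Spec_get_active_nav; infer_instance

-- ===== CLAIM (what is proved, stated in full; the proofs are below) =====
def Claim_equal_get_active_nav : Prop := ∀ (filename : String), Dom_get_active_nav filename → Spec_get_active_nav filename (get_active_nav filename)

-- ===== LEMMAS AND PROOFS =====

-- Python's str '<' is code-point lexicographic = Lean's '<' on toList (PYSEM.md)
theorem pairwiseKeyLt_of_toList {l : List (String × String)}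
    (h : l.Pairwise (fun a b => a.1.toList < b.1.toList)) :
    l.Pairwise (fun a b => a.1 < b.1) :=
  h.imp (fun hab => String.lt_iff_toList_lt.mpr hab)

-- common specification: the first (here: unique) pair whose key is x, else 'dashboard'
def findVal (pairs : List (String × String)) (x : String) : String :=
  match pairs.find? (fun p => p.1 == x) with
  | some p => p.2
  | none => "dashboard"

-- the sorted table, named as a literal
theorem pairsB_eq : pairsB =
    [("ai_chat - Copy.html", "ai_chat"), ("ai_chat.html", "ai_chat"),
     ("ai_chat_modern.html", "ai_chat"), ("ai_chat_pro.html", "ai_chat"),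
     ("analytics_improved.html", "analytics"), ("analytics_new.html", "analytics"),
     ("chat.html", "ai_chat"), ("chromadb_status.html", "dashboard"),
     ("clean_chat.html", "ai_chat"), ("compliance_checker.html", "compliance"),
     ("compliance_results.html", "compliance"), ("doccheck.html", "compliance"),
     ("document_classification - Copy.html", "documents"),
     ("document_classification.html", "documents"),
     ("document_classification_ai.html", "documents"),
     ("document_classification_backup.html", "documents"),
     ("document_classification_modern.html", "documents"),
     ("document_upload.html", "documents"), ("enhanced_chat.html", "ai_chat"),
     ("enhanced_chat_complete.html", "ai_chat"), ("index.html", "dashboard"),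
     ("rich.html", "dashboard"), ("richold.html", "dashboard"),
     ("smart_chat.html", "ai_chat"), ("websiteIndex.html", "dashboard")] := by
  unfold pairsB
  apply PySem.List.sorted_eq_of_perm_of_pairwise_lt
  · decide
  · exact pairwiseKeyLt_of_toList (by decide)

-- one unfolding step of the loop when lo < hi
theorem pvBsearch_step (pairs : List (String × String)) (x : String) (lo hi : Nat)
    (hlt : lo < hi) :
    pvBsearch pairs x lo hi =
      (if (pairs.getD ((lo + hi) / 2) ("", "")).1 = x then (pairs.getD ((lo + hi) / 2) ("", "")).2
       else if (pairs.getD ((lo + hi) / 2) ("", "")).1 < x then pvBsearch pairs x ((lo + hi) / 2 + 1) hi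
       else pvBsearch pairs x lo ((lo + hi) / 2)) := by
  rw [pvBsearch.eq_def, dif_pos hlt]

theorem pvBsearch_stop (pairs : List (String × String)) (x : String) (lo hi : Nat)
    (hge : ¬ lo < hi) : pvBsearch pairs x lo hi = "dashboard" := by
  rw [pvBsearch.eq_def, dif_neg hge]

-- with distinct keys, find? returns exactly the pair whose key is x
theorem find?_of_mem_nodup {l : List (String × String)} {p : String × String} {x : String}
    (hnd : (l.map Prod.fst).Nodup) (hp : p ∈ l) (hpx : p.1 = x) :
    l.find? (fun q => q.1 == x) = some p := by
  induction l with
  | nil => cases hp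
  | cons q rest ih =>
      simp only [List.map_cons, List.nodup_cons] at hnd
      rcases List.mem_cons.mp hp with rfl | hmem
      · simp [hpx]
      · have hqx : q.1 ≠ x := by
          intro h
          exact hnd.1 (by rw [h, ← hpx]; exact List.mem_map.mpr ⟨p, hmem, rfl⟩)
        simp [hqx, ih hnd.2 hmem]

-- the first element equal to x found in a list containing x is x itself
theorem find?_beq_self {l : List String} {x : String} (hx : x ∈ l) :
    l.find? (fun f => f == x) = some x := by
  induction l with
  | nil => cases hx
  | cons a rest ih =>
      by_cases h : a = x
      · simp [h]
      · rcases List.mem_cons.mp hx with rfl | hmem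
        · exact absurd rfl h
        · simp [h, ih hmem]

-- A's scan over the nested map equals findVal on the flattened (filename, nav) pairs
theorem navScan_eq_findVal (x : String) :
    ∀ items : List (String × List String),
      navScan x items = findVal (items.flatMap (fun p => p.2.map (fun f => (f, p.1)))) x := by
  intro items
  induction items with
  | nil => rfl
  | cons p rest ih =>
      obtain ⟨nav, files⟩ := p
      simp only [navScan, findVal, List.flatMap_cons, List.find?_append, List.find?_map,
        Function.comp_def]
      by_cases h : files.contains x = true
      · have hm : x ∈ files := by simpa using h
        rw [if_pos h,
          show (files.find? fun a => ((a, nav) : String × String).1 == x) = some x from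
            find?_beq_self hm]
        simp
      · have hnone : (files.find? fun a => ((a, nav) : String × String).1 == x) = none := by
          apply List.find?_eq_none.mpr
          intro a ha
          simp only [beq_iff_eq]
          intro hax
          exact h (by simpa using (hax ▸ ha : x ∈ files))
        rw [if_neg h, hnone, ih]
        simp [findVal]

-- findVal is permutation-invariant when keys are distinct
theorem findVal_perm {l l' : List (String × String)} (hperm : l.Perm l')
    (hnd : (l.map Prod.fst).Nodup) (x : String) : findVal l x = findVal l' x := by
  have hnd' : (l'.map Prod.fst).Nodup := ((hperm.map Prod.fst).nodup_iff).mp hnd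
  by_cases h : ∃ p ∈ l, p.1 = x
  · obtain ⟨p, hp, hpx⟩ := h
    unfold findVal
    rw [find?_of_mem_nodup hnd hp hpx, find?_of_mem_nodup hnd' (hperm.mem_iff.mp hp) hpx]
  · push_neg at h
    unfold findVal
    rw [List.find?_eq_none.mpr (fun p hp => by simpa using h p hp),
        List.find?_eq_none.mpr (fun p hp => by simpa using h p (hperm.mem_iff.mpr hp))]

-- binary-search correctness on a key-strictly-sorted list: if every index holding key x
-- lies in the window [lo, hi), the loop returns findVal
theorem pvBsearch_eq_findVal {pairs : List (String × String)}
    (hs : pairs.Pairwise (fun a b => a.1 < b.1)) (x : String) :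
    ∀ lo hi : Nat, hi ≤ pairs.length →
      (∀ i (hi' : i < pairs.length), (pairs[i]).1 = x → lo ≤ i ∧ i < hi) →
      pvBsearch pairs x lo hi = findVal pairs x := by
  have hnd : (pairs.map Prod.fst).Nodup := by
    rw [List.nodup_iff_pairwise_ne, List.pairwise_map]
    exact hs.imp (fun h => ne_of_lt h)
  have hmono : ∀ i j (hi' : i < pairs.length) (hj' : j < pairs.length), i < j →
      (pairs[i]).1 < (pairs[j]).1 :=
    fun i j hi' hj' hij => (List.pairwise_iff_getElem.mp hs) i j hi' hj' hij
  suffices H : ∀ n lo hi, hi - lo ≤ n → hi ≤ pairs.length →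
      (∀ i (hi' : i < pairs.length), (pairs[i]).1 = x → lo ≤ i ∧ i < hi) →
      pvBsearch pairs x lo hi = findVal pairs x by
    exact fun lo hi h1 h2 => H (hi - lo) lo hi le_rfl h1 h2
  intro n
  induction n with
  | zero =>
      intro lo hi hfuel hhi hinv
      have hge : ¬ lo < hi := by omega
      rw [pvBsearch_stop pairs x lo hi hge]
      unfold findVal
      rw [List.find?_eq_none.mpr ?_]
      intro p hp
      simp only [beq_iff_eq]
      intro hpx
      obtain ⟨i, hi', hieq⟩ := List.mem_iff_getElem.mp hp
      have := hinv i hi' (hieq ▸ hpx)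
      omega
  | succ n ih =>
      intro lo hi hfuel hhi hinv
      by_cases hlt : lo < hi
      · have hmid : (lo + hi) / 2 < pairs.length := by omega
        have hpget : pairs.getD ((lo + hi) / 2) ("", "") = pairs[(lo + hi) / 2] := by
          simp [List.getD_eq_getElem?_getD, List.getElem?_eq_getElem hmid]
        rw [pvBsearch_step pairs x lo hi hlt, hpget]
        by_cases hpx : (pairs[(lo + hi) / 2]).1 = x
        · rw [if_pos hpx]
          unfold findVal
          rw [find?_of_mem_nodup hnd (pairs.getElem_mem hmid) hpx]
        · rw [if_neg hpx]
          by_cases hplt : (pairs[(lo + hi) / 2]).1 < x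
          · rw [if_pos hplt]
            apply ih ((lo + hi) / 2 + 1) hi (by omega) hhi
            intro i hi' hix
            refine ⟨?_, (hinv i hi' hix).2⟩
            by_contra hcon
            push_neg at hcon
            have hle : (pairs[i]).1 < x := by
              rcases Nat.lt_or_eq_of_le (by omega : i ≤ (lo + hi) / 2) with h2 | h2
              · exact lt_trans (hmono i ((lo + hi) / 2) hi' hmid h2) hplt
              · subst h2; exact hplt
            exact absurd hix (ne_of_lt hle)
          · rw [if_neg hplt]
            have hgt : x < (pairs[(lo + hi) / 2]).1 := by
              rcases lt_trichotomy (pairs[(lo + hi) / 2]).1 x with h | h | h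
              · exact absurd h hplt
              · exact absurd h hpx
              · exact h
            apply ih lo ((lo + hi) / 2) (by omega) (by omega)
            intro i hi' hix
            refine ⟨(hinv i hi' hix).1, ?_⟩
            by_contra hcon
            push_neg at hcon
            have hge2 : (lo + hi) / 2 ≤ i := hcon
            have hle : x < (pairs[i]).1 := by
              rcases Nat.lt_or_eq_of_le hge2 with h2 | h2
              · exact lt_trans hgt (hmono ((lo + hi) / 2) i hmid hi' h2)
              · subst h2; exact hgt
            exact absurd hix (ne_of_gt hle)
      · rw [pvBsearch_stop pairs x lo hi hlt]
        unfold findVal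
        rw [List.find?_eq_none.mpr ?_]
        intro p hp
        simp only [beq_iff_eq]
        intro hpx
        obtain ⟨i, hi', hieq⟩ := List.mem_iff_getElem.mp hp
        have := hinv i hi' (hieq ▸ hpx)
        omega

-- ===== VERDICT (by name: the statement is the Claim_ definition above) =====
theorem get_active_nav_spec : Claim_equal_get_active_nav := by
  intro x _
  unfold Spec_get_active_nav get_active_nav get_active_nav_alt
  have hperm : (activeItems.flatMap (fun p => p.2.map (fun f => (f, p.1)))).Perm pairsB := by
    rw [pairsB_eq]; decide
  have hnd : ((activeItems.flatMap (fun p => p.2.map (fun f => (f, p.1)))).map Prod.fst).Nodup := by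
    decide
  have hs : pairsB.Pairwise (fun a b => a.1 < b.1) := by
    rw [pairsB_eq]; exact pairwiseKeyLt_of_toList (by decide)
  rw [navScan_eq_findVal x activeItems, findVal_perm hperm hnd x,
    pvBsearch_eq_findVal hs x 0 pairsB.length le_rfl (fun i hi' _ => ⟨Nat.zero_le i, hi'⟩)]
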